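-- pv_equiv track=rewrite | github.com/ElariaB/Cryptographie---MESS-1-2-3 | dechiffrement1.py | creer_grille
-- ===== SOURCE A (Python) =====
-- def creer_grille(message, longueur_cle):
--     colonnes = longueur_cle
--     lignes = len(message) // colonnes
--     if len(message) % colonnes != 0:
--         lignes += 1
--
--     grille = [[''] * colonnes for _ in range(lignes)]
--     index = 0
--     for row in range(lignes):
--         for col in range(colonnes):
--             if index < len(message):
--                 grille[row][col] = message[index]
--                 index += 1
--     return grille
-- ===== SOURCE B (Python) =====
-- def creer_grille(message, longueur_cle):
--     colonnes = longueur_cle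
--     lignes = len(message) // colonnes
--     if len(message) % colonnes != 0:
--         lignes += 1
--     padded = list(message) + [''] * (lignes * colonnes - len(message))
--     return [padded[row * colonnes:(row + 1) * colonnes] for row in range(lignes)]
-- ===== Notes on version B (the rewrite author's own statement) =====
-- stated objective: simpler
-- what changed: B builds the grid by padding the character list once and slicing it into rows, instead of pre-building a blank grid and placing characters one cell at a time with a running index.
import Mathlib
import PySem

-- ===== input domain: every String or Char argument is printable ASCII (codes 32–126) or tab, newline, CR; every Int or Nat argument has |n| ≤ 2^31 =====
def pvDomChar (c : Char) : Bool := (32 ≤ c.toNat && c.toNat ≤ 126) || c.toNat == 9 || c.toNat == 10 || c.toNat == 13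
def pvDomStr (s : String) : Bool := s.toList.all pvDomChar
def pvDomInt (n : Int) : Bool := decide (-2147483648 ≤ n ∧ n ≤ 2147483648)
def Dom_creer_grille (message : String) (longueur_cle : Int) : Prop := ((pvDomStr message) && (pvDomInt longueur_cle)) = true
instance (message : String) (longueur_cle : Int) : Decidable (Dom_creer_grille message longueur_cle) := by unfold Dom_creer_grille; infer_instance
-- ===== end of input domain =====

-- B fills the grid by padding the character list once and slicing it into rows, instead of
-- pre-building a blank grid and placing characters one cell at a time with a running index.

-- ===== PORT A =====
def creer_grille (message : String) (longueur_cle : Int) : List (List String) :=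
  let colonnes := longueur_cle
  let n : Int := PySem.Str.len message
  let lignes0 := PySem.Int.floordiv n colonnes
  let lignes := if PySem.Int.mod n colonnes ≠ 0 then lignes0 + 1 else lignes0
  let grille : List (List String) :=
    (PySem.List.pyRange 0 lignes 1).map (fun _ => PySem.List.pyRepeat [""] colonnes)
  let res := (PySem.List.pyRange 0 lignes 1).foldl (fun st row =>
    (PySem.List.pyRange 0 colonnes 1).foldl (fun st col =>
      if st.2 < n then
        -- grille[row][col] = message[index]: row/col/index are nonnegative and in range
        -- here, so pyGetD/pySetD and the `.getD` on the guarded pyGet? are exact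
        (PySem.List.pySetD st.1 row
           (PySem.List.pySetD (PySem.List.pyGetD st.1 row []) col
             (String.ofList (PySem.Str.pyGet? message st.2).toList)), st.2 + 1)
      else st) st) (grille, (0 : Int))
  res.1

-- ===== PORT B =====
def creer_grille_alt (message : String) (longueur_cle : Int) : List (List String) :=
  let colonnes := longueur_cle
  let n : Int := PySem.Str.len message
  let lignes0 := PySem.Int.floordiv n colonnes
  let lignes := if PySem.Int.mod n colonnes ≠ 0 then lignes0 + 1 else lignes0
  let padded : List String := message.toList.map (fun ch => String.ofList [ch])
      ++ PySem.List.pyRepeat [""] (lignes * colonnes - n)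
  (PySem.List.pyRange 0 lignes 1).map (fun row =>
    PySem.List.slice padded (some (row * colonnes)) (some ((row + 1) * colonnes)))

-- ===== PRECONDITION & SPEC =====
-- Pre_ excludes only longueur_cle = 0, where the Python A raises ZeroDivisionError (B raises too).
def Pre_creer_grille (message : String) (longueur_cle : Int) : Prop := longueur_cle ≠ 0
instance (message : String) (longueur_cle : Int) : Decidable (Pre_creer_grille message longueur_cle) := by unfold Pre_creer_grille; infer_instance
def pvWitness_creer_grille : String × Int := ("abcde", 2)

def Spec_creer_grille (message : String) (longueur_cle : Int) (out : List (List String)) : Prop := out = creer_grille_alt message longueur_cle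
instance (message : String) (longueur_cle : Int) (out : List (List String)) : Decidable (Spec_creer_grille message longueur_cle out) := by unfold Spec_creer_grille; infer_instance

-- ===== CLAIM (what is proved, stated in full; the proofs are below) =====
def Claim_equal_creer_grille : Prop := ∀ (message : String) (longueur_cle : Int), Dom_creer_grille message longueur_cle → Pre_creer_grille message longueur_cle → Spec_creer_grille message longueur_cle (creer_grille message longueur_cle)

-- ===== LEMMAS AND PROOFS =====

-- the message's characters as one-character Python strings
def pvChars (message : String) : List String := message.toList.map (fun ch => String.ofList [ch])
-- cell value: character idx of the message, or '' past the end
def pvF (chars : List String) (idx : Nat) : String := chars.getD idx ""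
-- a finished row
def pvRow (chars : List String) (cN r : Nat) : List String :=
  (List.range cN).map (fun t => pvF chars (r * cN + t))
-- a partially finished row (first t cells placed)
def pvPartial (chars : List String) (cN r t : Nat) : List String :=
  (List.range cN).map (fun u => if u < t then pvF chars (r * cN + u) else "")
-- the grid after the first r rows are finished
def pvDone (chars : List String) (L cN r : Nat) : List (List String) :=
  (List.range L).map (fun j => if j < r then pvRow chars cN j else List.replicate cN "")
-- the grid mid-row: rows < r finished, row r has its first t cells placed
def pvMid (chars : List String) (L cN r t : Nat) : List (List String) :=
  (List.range L).map (fun j =>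
    if j < r then pvRow chars cN j
    else if j = r then pvPartial chars cN r t else List.replicate cN "")

theorem pv_set_map_range {α : Type} (h : Nat → α) (m k : Nat) (v : α) :
    ((List.range m).map h).set k v
      = (List.range m).map (fun u => if u = k then v else h u) := by
  apply List.ext_getElem
  · simp
  · intro i h1 h2
    simp only [List.getElem_set, List.getElem_map, List.getElem_range] at *
    by_cases hik : k = i
    · simp [hik]
    · simp [hik]
      intro he; exact absurd he.symm hik

-- value placed at cell idx when idx < n: the one-character string
theorem pv_chars_len (message : String) : (pvChars message).length = message.toList.length := by
  simp [pvChars]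

theorem pv_match_eq (message : String) (idx : Nat) (hidx : idx < message.toList.length) :
    String.ofList (PySem.Str.pyGet? message (idx : Int)).toList = pvF (pvChars message) idx := by
  rw [PySem.Str.pyGet?_natCast]
  rw [List.getElem?_eq_getElem hidx]
  simp only [pvF, pvChars, Option.toList_some, List.getD_eq_getElem?_getD, List.getElem?_map,
    List.getElem?_eq_getElem hidx, Option.map_some, Option.getD_some]

theorem pv_partial_zero (chars : List String) (cN r : Nat) :
    pvPartial chars cN r 0 = List.replicate cN "" := by
  simp [pvPartial, List.map_const']

theorem pv_partial_full (chars : List String) (cN r : Nat) :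
    pvPartial chars cN r cN = pvRow chars cN r := by
  unfold pvPartial pvRow
  apply List.map_congr_left
  intro u hu
  simp [List.mem_range.mp hu]

theorem pv_mid_getD (chars : List String) (L cN r t : Nat) (hr : r < L) :
    (pvMid chars L cN r t).getD r [] = pvPartial chars cN r t := by
  unfold pvMid
  rw [PySem.List.getD_map_range _ _ _ _ hr]
  simp

theorem pv_partial_set (chars : List String) (cN r t : Nat) :
    (pvPartial chars cN r t).set t (pvF chars (r * cN + t)) = pvPartial chars cN r (t + 1) := by
  unfold pvPartial
  rw [pv_set_map_range]
  apply List.map_congr_left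
  intro u hu
  by_cases h1 : u = t
  · simp [h1]
  · have : u < t ↔ u < t + 1 := by omega
    simp [h1, this]

theorem pv_mid_set (chars : List String) (L cN r t : Nat) (row : List String) :
    (pvMid chars L cN r t).set r row
      = (List.range L).map (fun j =>
          if j < r then pvRow chars cN j
          else if j = r then row else List.replicate cN "") := by
  unfold pvMid
  rw [pv_set_map_range]
  apply List.map_congr_left
  intro j hj
  by_cases h1 : j = r
  · simp [h1]
  · simp [h1]

theorem pv_mid_stall (chars : List String) (cN r t : Nat)
    (h : chars.length ≤ r * cN + t) :
    pvPartial chars cN r t = pvPartial chars cN r (t + 1) := by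
  unfold pvPartial
  apply List.map_congr_left
  intro u hu
  by_cases h1 : u = t
  · subst h1
    simp only [lt_irrefl, if_false, Nat.lt_succ_self, if_true]
    unfold pvF
    rw [List.getD_eq_default]
    omega
  · have : u < t ↔ u < t + 1 := by omega
    simp [this]

theorem pv_mid_done (chars : List String) (L cN r : Nat) :
    pvMid chars L cN r cN = pvDone chars L cN (r + 1) := by
  unfold pvMid pvDone
  apply List.map_congr_left
  intro j hj
  by_cases h1 : j < r
  · simp [h1, Nat.lt_succ_of_lt h1]
  · by_cases h2 : j = r
    · simp [h2, pv_partial_full]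
    · have : ¬ j < r + 1 := by omega
      simp [h1, h2, this]

theorem pv_done_mid (chars : List String) (L cN r : Nat) :
    pvDone chars L cN r = pvMid chars L cN r 0 := by
  unfold pvDone pvMid
  apply List.map_congr_left
  intro j hj
  by_cases h1 : j < r
  · simp [h1]
  · by_cases h2 : j = r <;> simp [h1, h2, pv_partial_zero]

theorem pv_step (message : String) (cN L r t : Nat) (hr : r < L) :
    (if ((min (r * cN + t) message.toList.length : Nat) : Int) < (message.toList.length : Int) then
      (PySem.List.pySetD (pvMid (pvChars message) L cN r t) (r : Int)
        (PySem.List.pySetD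
          (PySem.List.pyGetD (pvMid (pvChars message) L cN r t) (r : Int) []) (t : Int)
          (String.ofList
            (PySem.Str.pyGet? message
              ((min (r * cN + t) message.toList.length : Nat) : Int)).toList)),
       ((min (r * cN + t) message.toList.length : Nat) : Int) + 1)
    else (pvMid (pvChars message) L cN r t,
          ((min (r * cN + t) message.toList.length : Nat) : Int)))
    = (pvMid (pvChars message) L cN r (t + 1),
       ((min (r * cN + t + 1) message.toList.length : Nat) : Int)) := by
  by_cases hlt : r * cN + t < message.toList.length
  · have hmin : min (r * cN + t) message.toList.length = r * cN + t := by omega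
    rw [hmin, if_pos (by exact_mod_cast hlt)]
    rw [pv_match_eq message (r * cN + t) hlt]
    rw [PySem.List.pyGetD_natCast, pv_mid_getD _ _ _ _ _ hr]
    simp only [PySem.List.pySetD_natCast]
    rw [pv_partial_set, pv_mid_set]
    refine Prod.ext ?_ ?_
    · rfl
    · show ((r * cN + t : Nat) : Int) + 1 = _
      have : min (r * cN + t + 1) message.toList.length = r * cN + t + 1 := by omega
      rw [this]; push_cast; ring
  · have hmin : min (r * cN + t) message.toList.length = message.toList.length := by omega
    rw [hmin, if_neg (by omega)]
    have hstall := pv_mid_stall (pvChars message) cN r t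
      (by rw [pv_chars_len]; omega)
    refine Prod.ext ?_ ?_
    · show pvMid _ _ _ _ _ = pvMid _ _ _ _ _
      unfold pvMid
      rw [hstall]
    · show ((message.toList.length : Nat) : Int) = _
      have : min (r * cN + t + 1) message.toList.length = message.toList.length := by omega
      rw [this]

theorem pv_inner (message : String) (cN L r : Nat) (hr : r < L) :
    ∀ (m t : Nat), t + m = cN →
    (List.range' t m).foldl (fun (st : List (List String) × Int) (tt : Nat) =>
      if st.2 < (message.toList.length : Int) then
        (PySem.List.pySetD st.1 (r : Int)
          (PySem.List.pySetD (PySem.List.pyGetD st.1 (r : Int) []) (tt : Int)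
            (String.ofList (PySem.Str.pyGet? message st.2).toList)), st.2 + 1)
      else st)
      (pvMid (pvChars message) L cN r t,
        ((min (r * cN + t) message.toList.length : Nat) : Int))
    = (pvDone (pvChars message) L cN (r + 1),
        ((min (r * cN + cN) message.toList.length : Nat) : Int)) := by
  intro m
  induction m with
  | zero =>
    intro t ht
    have : t = cN := by omega
    subst this
    simp only [List.range'_zero, List.foldl_nil]
    rw [pv_mid_done]
  | succ m ih =>
    intro t ht
    simp only [List.range'_succ, List.foldl_cons]
    rw [pv_step message cN L r t hr]
    exact ih (t + 1) (by omega)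

theorem pv_outer (message : String) (cN L : Nat) :
    ∀ (m r : Nat), r + m = L →
    (List.range' r m).foldl (fun (st : List (List String) × Int) (rr : Nat) =>
      (List.range cN).foldl (fun (st2 : List (List String) × Int) (tt : Nat) =>
        if st2.2 < (message.toList.length : Int) then
          (PySem.List.pySetD st2.1 (rr : Int)
            (PySem.List.pySetD (PySem.List.pyGetD st2.1 (rr : Int) []) (tt : Int)
              (String.ofList (PySem.Str.pyGet? message st2.2).toList)), st2.2 + 1)
        else st2) st)
      (pvDone (pvChars message) L cN r,
        ((min (r * cN) message.toList.length : Nat) : Int))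
    = (pvDone (pvChars message) L cN L,
        ((min (L * cN) message.toList.length : Nat) : Int)) := by
  intro m
  induction m with
  | zero =>
    intro r hrm
    have : r = L := by omega
    subst this
    simp only [List.range'_zero, List.foldl_nil]
  | succ m ih =>
    intro r hrm
    have hr : r < L := by omega
    simp only [List.range'_succ, List.foldl_cons]
    have H := pv_inner message cN L r hr cN 0 (by omega)
    simp only [Nat.add_zero] at H
    rw [← List.range_eq_range'] at H
    rw [pv_done_mid, H]
    have h1 : r * cN + cN = (r + 1) * cN := by ring
    rw [h1]
    exact ih (r + 1) (by omega)

theorem pv_done_full (chars : List String) (L cN : Nat) :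
    pvDone chars L cN L = (List.range L).map (pvRow chars cN) := by
  unfold pvDone
  apply List.map_congr_left
  intro j hj
  simp [List.mem_range.mp hj]

theorem pv_ceil (cN n : Nat) (hc : 0 < cN) :
    n ≤ (n / cN + (if n % cN = 0 then 0 else 1)) * cN := by
  by_cases h : n % cN = 0
  · simp only [h, if_true, Nat.add_zero]
    exact Nat.le_of_eq (Nat.div_mul_cancel (Nat.dvd_of_mod_eq_zero h)).symm
  · simp only [h, if_false]
    calc n = cN * (n / cN) + n % cN := (Nat.div_add_mod n cN).symm
      _ ≤ cN * (n / cN) + cN := by have := Nat.mod_lt n hc; omega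
      _ = (n / cN + 1) * cN := by ring

theorem pv_slice_row (chars : List String) (L cN k : Nat)
    (hnL : chars.length ≤ L * cN) (hk : k < L) :
    PySem.List.slice (chars ++ List.replicate (L * cN - chars.length) "")
        (some ((k : Int) * (cN : Int))) (some (((k : Int) + 1) * (cN : Int)))
      = pvRow chars cN k := by
  have e1 : (k : Int) * (cN : Int) = ((k * cN : Nat) : Int) := by push_cast; ring
  have e2 : ((k : Int) + 1) * (cN : Int) = (((k + 1) * cN : Nat) : Int) := by push_cast; ring
  rw [e1, e2, PySem.List.slice_natCast]
  have e3 : (k + 1) * cN - k * cN = cN := by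
    rw [Nat.succ_mul]; omega
  rw [e3]
  have hlen : (chars ++ List.replicate (L * cN - chars.length) "").length = L * cN := by
    simp; omega
  have hkc : k * cN + cN ≤ L * cN := by
    have : (k + 1) * cN ≤ L * cN := Nat.mul_le_mul_right cN hk
    rw [Nat.succ_mul] at this; omega
  apply List.ext_getElem
  · simp [pvRow, hlen]; omega
  · intro i h1 h2
    have hi : i < cN := by simp [hlen] at h1; omega
    rw [List.getElem_take, List.getElem_drop]
    simp only [pvRow, List.getElem_map, List.getElem_range]
    unfold pvF
    by_cases hin : k * cN + i < chars.length
    · rw [List.getElem_append_left hin]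
      rw [List.getD_eq_getElem?_getD, List.getElem?_eq_getElem hin]
      rfl
    · rw [List.getElem_append_right (by omega)]
      rw [List.getElem_replicate]
      rw [List.getD_eq_default _ _ (by omega)]

theorem pv_main (message : String) (longueur_cle : Int) (h : longueur_cle ≠ 0) :
    creer_grille message longueur_cle = creer_grille_alt message longueur_cle := by
  unfold creer_grille creer_grille_alt
  rcases lt_or_gt_of_ne h with hc | hc
  · -- longueur_cle < 0: lignes ≤ 0, both grids are empty
    simp only [PySem.Str.len_eq]
    set n := message.toList.length with hn
    set lig := (if PySem.Int.mod (n : Int) longueur_cle ≠ 0 then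
        PySem.Int.floordiv (n : Int) longueur_cle + 1
      else PySem.Int.floordiv (n : Int) longueur_cle) with hlig
    have hq : lig ≤ 0 := by
      rcases Nat.eq_zero_or_pos n with h0 | h0
      · rw [hlig, h0]
        simp [PySem.Int.floordiv, PySem.Int.mod]
      · have hneg : PySem.Int.floordiv (n : Int) longueur_cle < 0 := by
          rw [← PySem.Int.floordiv_neg_neg (n : Int) longueur_cle]
          refine (PySem.Int.floordiv_lt_iff_lt_mul (by omega : (0:Int) < -longueur_cle)).mpr ?_
          simp
          omega
        rw [hlig]
        split_ifs <;> omega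
    have ht0 : (lig - 0).toNat = 0 := by omega
    simp only [PySem.List.pyRange_one, ht0, List.range_zero, List.map_nil, List.foldl_nil]
  · -- longueur_cle > 0
    lift longueur_cle to ℕ using (le_of_lt hc) with cN
    have hcN : 0 < cN := by exact_mod_cast hc
    simp only [PySem.Str.len_eq, PySem.Int.floordiv_natCast, PySem.Int.mod_natCast]
    obtain ⟨L, hL⟩ : ∃ L : ℕ,
        L = message.toList.length / cN + (if message.toList.length % cN = 0 then 0 else 1) :=
      ⟨_, rfl⟩
    have hLif : (if ((message.toList.length % cN : Nat) : Int) ≠ 0 then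
        ((message.toList.length / cN : Nat) : Int) + 1
        else ((message.toList.length / cN : Nat) : Int)) = (L : Int) := by
      by_cases h0 : message.toList.length % cN = 0
      · rw [if_neg (by rw [h0]; simp)]
        rw [hL, h0]
        push_cast
        ring
      · rw [if_pos (by exact_mod_cast h0)]
        rw [hL]
        simp only [h0, if_false]
        push_cast
        ring
    rw [hLif]
    have hceil : message.toList.length ≤ L * cN := by rw [hL]; exact pv_ceil cN _ hcN
    have epadX : ∀ X : ℕ, ((X : Int) - (message.toList.length : Int)).toNat
        = X - message.toList.length := by intro X; omega
    have hpad : ((L : Int) * (cN : Int) - (message.toList.length : Int)).toNat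
        = L * cN - message.toList.length := by
      rw [show ((L : Int) * (cN : Int)) = ((L * cN : ℕ) : Int) by push_cast; ring]
      exact epadX (L * cN)
    clear hL
    simp only [PySem.List.pyRange_one, Int.sub_zero, PySem.List.pyRepeat_singleton, hpad,
      Int.toNat_natCast, List.foldl_map, List.map_map, Function.comp_def, zero_add]
    have H := pv_outer message cN L L 0 (by omega)
    rw [← List.range_eq_range'] at H
    have hd0 : pvDone (pvChars message) L cN 0
        = (List.range L).map (fun _ => List.replicate cN "") := by
      unfold pvDone
      apply List.map_congr_left
      intro j _
      simp
    have hi0 : ((min (0 * cN) message.toList.length : Nat) : Int) = 0 := by simp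
    rw [hd0, hi0] at H
    refine (congrArg Prod.fst H).trans ?_
    show pvDone (pvChars message) L cN L = _
    rw [pv_done_full]
    apply List.map_congr_left
    intro k hk
    have hkL : k < L := List.mem_range.mp hk
    have hs := pv_slice_row (pvChars message) L cN k (by rw [pv_chars_len]; exact hceil) hkL
    rw [pv_chars_len] at hs
    exact hs.symm

-- ===== VERDICT (by name: the statement is the Claim_ definition above) =====
theorem creer_grille_spec : Claim_equal_creer_grille := by
  intro message longueur_cle _ hpre
  unfold Spec_creer_grille
  exact pv_main message longueur_cle hpre
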